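-- pv_equiv track=rewrite | github.com/s1eeveW/StarCraft2 | Demo.py | remove_id
-- ===== SOURCE A (Python) =====
-- def remove_id(temp):
--     name_id = str(temp)
--     name = ""
--     open = False
--     for i in name_id:
--         if (i == ' '):
--             open = True
--         elif (i == '[') and (open == True):
--             break
--         else:
--             name += i
--     return name
-- ===== SOURCE B (Python) =====
-- def remove_id(temp):
--     s = str(temp)
--     sp = s.find(' ')
--     if sp != -1:
--         b = s.find('[', sp)
--         if b != -1:
--             s = s[:b]
--     return s.replace(' ', '')
-- ===== Notes on version B (the rewrite author's own statement) =====
-- stated objective: faster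
-- what changed: Replaces the char-by-char Python loop with an open flag by two built-in substring searches (first space, then first opening bracket after it), one truncating slice, and a single built-in replace that drops all spaces.
import Mathlib
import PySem

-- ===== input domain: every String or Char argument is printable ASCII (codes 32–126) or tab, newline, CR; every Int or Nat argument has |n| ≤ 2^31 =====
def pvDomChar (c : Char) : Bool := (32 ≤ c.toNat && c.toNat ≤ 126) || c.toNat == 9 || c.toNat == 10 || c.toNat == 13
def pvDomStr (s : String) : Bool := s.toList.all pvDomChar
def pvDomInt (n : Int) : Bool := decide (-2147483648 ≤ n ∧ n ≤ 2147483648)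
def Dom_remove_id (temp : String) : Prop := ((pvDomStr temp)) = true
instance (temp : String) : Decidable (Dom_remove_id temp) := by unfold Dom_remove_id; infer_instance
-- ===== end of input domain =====

-- B finds the cut point with string searches (first space, then first '[' after it) and
-- strips spaces with one replace, instead of A's char-by-char loop with an 'open' flag;
-- objective: faster (built-in searches/replace instead of a per-char Python loop; measured
-- faster in a timing run).

-- ===== PORT A =====
-- the 'for i in name_id: …' loop with accumulator 'name' and flag 'open'; 'break' ends the loop
def remove_id_loop : List Char → List Char → Bool → List Char
  | [], name, _ => name
  | c :: rest, name, opn =>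
    if c = ' ' then remove_id_loop rest name true
    else if c = '[' ∧ opn = true then name
    else remove_id_loop rest (name ++ [c]) opn

def remove_id (temp : String) : String :=
  -- name_id = str(temp) is temp itself (temp is already a str)
  String.ofList (remove_id_loop temp.toList [] false)

-- ===== PORT B =====
def remove_id_alt (temp : String) : String :=
  let s := temp.toList                                  -- s = str(temp)
  let sp := PySem.Chars.find s [' ']                    -- sp = s.find(' ')
  let s :=
    if sp ≠ -1 then
      let b := PySem.Chars.findFrom s ['['] sp none     -- b = s.find('[', sp)
      if b ≠ -1 then PySem.Chars.slice s none (some b)  -- s = s[:b]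
      else s
    else s
  String.ofList (PySem.Chars.replace s [' '] [])        -- return s.replace(' ', '')

-- ===== PRECONDITION & SPEC =====
def Spec_remove_id (temp : String) (out : String) : Prop := out = remove_id_alt temp
instance (temp : String) (out : String) : Decidable (Spec_remove_id temp out) := by unfold Spec_remove_id; infer_instance

-- ===== CLAIM (what is proved, stated in full; the proofs are below) =====
def Claim_equal_remove_id : Prop := ∀ (temp : String), Dom_remove_id temp → Spec_remove_id temp (remove_id temp)

-- ===== LEMMAS AND PROOFS =====

-- Clean form of A's result: chars before the first space verbatim; after it, keep up to
-- the first '[' and drop all spaces.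
def cutFilter : List Char → List Char
  | [] => []
  | c :: t =>
    if c = ' ' then (t.takeWhile (· ≠ '[')).filter (· ≠ ' ')
    else c :: cutFilter t

theorem remove_id_loop_acc : ∀ (s name : List Char) (opn : Bool),
    remove_id_loop s name opn = name ++ remove_id_loop s [] opn := by
  intro s
  induction s with
  | nil => intro name opn; simp [remove_id_loop]
  | cons c t ih =>
    intro name opn
    simp only [remove_id_loop]
    split_ifs with hc hb
    · exact ih name true
    · simp
    · rw [ih (name ++ [c]), ih ([] ++ [c])]
      simp

theorem loop_true_eq (s : List Char) :
    remove_id_loop s [] true = (s.takeWhile (· ≠ '[')).filter (· ≠ ' ') := by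
  induction s with
  | nil => simp [remove_id_loop]
  | cons c t ih =>
    by_cases hc : c = ' '
    · subst hc; simp [remove_id_loop, ih, List.filter_cons]
    · by_cases hb : c = '['
      · subst hb; simp_all [remove_id_loop]
      · simp only [remove_id_loop, if_neg hc, if_neg (by simp [hb] : ¬(c = '[' ∧ True = true))]
        rw [remove_id_loop_acc]
        simp [ih, hb, List.filter_cons, hc]

theorem loop_false_eq (s : List Char) :
    remove_id_loop s [] false = cutFilter s := by
  induction s with
  | nil => rfl
  | cons c t ih =>
    by_cases hc : c = ' '
    · subst hc; simp [remove_id_loop, cutFilter, loop_true_eq]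
    · simp only [remove_id_loop, if_neg hc,
        if_neg (by simp : ¬(c = '[' ∧ false = true)), cutFilter, if_neg hc]
      rw [remove_id_loop_acc]
      simp [ih]

-- cutFilter on a list with no space is the identity
theorem cutFilter_no_space (s : List Char) (h : ' ' ∉ s) : cutFilter s = s := by
  induction s with
  | nil => rfl
  | cons c t ih =>
    simp only [List.mem_cons, not_or] at h
    simp [cutFilter, Ne.symm h.1, ih h.2]

theorem cutFilter_space (a b : List Char) (h : ' ' ∉ a) :
    cutFilter (a ++ ' ' :: b) = a ++ (b.takeWhile (· ≠ '[')).filter (· ≠ ' ') := by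
  induction a with
  | nil => simp [cutFilter]
  | cons c t ih =>
    simp only [List.mem_cons, not_or] at h
    simp [cutFilter, Ne.symm h.1, ih h.2]

-- single-character find: first index of c, or -1
theorem find_go_single (c : Char) (s : List Char) : ∀ k : Nat,
    PySem.Chars.find.go [c] s k =
      if c ∈ s then (k : Int) + (s.takeWhile (· ≠ c)).length else -1 := by
  induction s with
  | nil => intro k; simp [PySem.Chars.find.go]
  | cons d t ih =>
    intro k
    by_cases hd : c = d
    · subst hd; simp [PySem.Chars.find.go, List.isPrefixOf, List.takeWhile_cons]
    · have : ¬ [c].isPrefixOf (d :: t) = true := by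
        simp [List.isPrefixOf]; exact fun h => absurd h hd
      simp only [PySem.Chars.find.go, if_neg this, ih]
      by_cases hm : c ∈ t
      · simp [hm, hd, Ne.symm hd, List.takeWhile_cons]
        push_cast; ring
      · simp [hm, hd]

theorem find_single (c : Char) (s : List Char) :
    PySem.Chars.find s [c] =
      if c ∈ s then ((s.takeWhile (· ≠ c)).length : Int) else -1 := by
  rw [PySem.Chars.find, find_go_single]
  split <;> simp

-- replacing a single character by the empty string is filtering it out
theorem replace_go_single (c : Char) : ∀ (fuel : Nat) (l acc : List Char),
    l.length ≤ fuel →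
    PySem.Chars.replace.go [c] [] fuel l acc = acc.reverse ++ l.filter (· ≠ c) := by
  intro fuel
  induction fuel with
  | zero =>
    intro l acc h
    have : l = [] := List.eq_nil_of_length_eq_zero (Nat.le_zero.mp h)
    subst this; simp [PySem.Chars.replace.go]
  | succ n ih =>
    intro l acc h
    cases l with
    | nil => simp [PySem.Chars.replace.go]
    | cons d t =>
      by_cases hd : c = d
      · subst hd
        have hp : [c].isPrefixOf (c :: t) = true := by simp [List.isPrefixOf]
        simp only [PySem.Chars.replace.go, hp, if_pos rfl]
        rw [ih _ _ (by simpa using Nat.le_of_succ_le_succ h)]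
        simp [List.filter_cons]
      · have hp : ¬ [c].isPrefixOf (d :: t) = true := by
          simp [List.isPrefixOf]; exact fun h => absurd h hd
        simp only [PySem.Chars.replace.go, if_neg hp]
        rw [ih _ _ (by simpa using Nat.le_of_succ_le_succ h)]
        simp [List.filter_cons, Ne.symm hd]

theorem replace_single (c : Char) (s : List Char) :
    PySem.Chars.replace s [c] [] = s.filter (· ≠ c) := by
  rw [PySem.Chars.replace]
  rw [if_neg (by simp : ¬([c].isEmpty = true))]
  rw [replace_go_single c s.length s [] le_rfl]
  simp

theorem takeWhile_filter_self (c : Char) (s : List Char) (h : c ∉ s) :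
    s.takeWhile (· ≠ c) = s := by
  rw [List.takeWhile_eq_self_iff]
  intro x hx
  simp only [decide_eq_true_eq]
  exact fun he => h (he ▸ hx)

theorem filter_self (c : Char) (s : List Char) (h : c ∉ s) :
    s.filter (· ≠ c) = s := by
  rw [List.filter_eq_self]
  intro x hx
  simp only [decide_eq_true_eq]
  exact fun he => h (he ▸ hx)

theorem takeWhile_prefix_append (p : Char → Bool) (a : List Char) (x : Char) (b : List Char)
    (ha : ∀ y ∈ a, p y = true) (hx : p x = false) :
    (a ++ x :: b).takeWhile p = a := by
  induction a with
  | nil => simp [List.takeWhile_cons, hx]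
  | cons c t ih =>
    have hc : p c = true := ha c (by simp)
    simp only [List.cons_append, List.takeWhile_cons, hc, if_true]
    rw [ih (fun y hy => ha y (by simp [hy]))]

theorem split_first_space (s : List Char) (h : ' ' ∈ s) :
    ∃ a b, s = a ++ ' ' :: b ∧ ' ' ∉ a := by
  induction s with
  | nil => cases h
  | cons c t ih =>
    by_cases hc : c = ' '
    · exact ⟨[], t, by simp [hc], by simp⟩
    · obtain ⟨a, b, h1, h2⟩ := ih (by
        rcases List.mem_cons.mp h with h | h
        · exact absurd h.symm hc
        · exact h)
      exact ⟨c :: a, b, by simp [h1], by simp [Ne.symm hc, h2]⟩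

-- ===== VERDICT (by name: the statement is the Claim_ definition above) =====
theorem remove_id_spec : Claim_equal_remove_id := by
  intro temp _
  unfold Spec_remove_id remove_id
  rw [loop_false_eq]
  by_cases hmem : ' ' ∈ temp.toList
  · obtain ⟨a, b, hsplit, ha⟩ := split_first_space _ hmem
    have hAll : ∀ y ∈ a, (decide ¬ y = ' ') = true := by
      intro y hy; simp only [decide_eq_true_eq]; exact fun he => ha (he ▸ hy)
    have hfind : PySem.Chars.find temp.toList [' '] = (a.length : Int) := by
      rw [find_single, if_pos hmem, hsplit, takeWhile_prefix_append _ a ' ' b hAll (by simp)]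
    have hcut : cutFilter temp.toList
        = a ++ (b.takeWhile (· ≠ '[')).filter (· ≠ ' ') := by
      rw [hsplit, cutFilter_space a b ha]
    have hdropT : temp.toList.drop a.length = ' ' :: b := by
      rw [hsplit]; simpa using List.drop_left a (' ' :: b)
    have hfc : PySem.Chars.find (' ' :: b) ['['] =
        if '[' ∈ b then (1 + ((b.takeWhile (· ≠ '[')).length : Int)) else -1 := by
      rw [find_single]
      by_cases hbr : '[' ∈ b
      · rw [if_pos (by simp [hbr]), if_pos hbr]
        simp [List.takeWhile_cons]
        omega
      · rw [if_neg (by simp [hbr]), if_neg hbr]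
    have hff : PySem.Chars.findFrom temp.toList ['['] ((a.length : Int)) none =
        if '[' ∈ b then ((a.length : Int) + (1 + ((b.takeWhile (· ≠ '[')).length : Int)))
        else -1 := by
      rw [PySem.Chars.findFrom_natCast _ _ a.length (by rw [hsplit]; simp)]
      rw [hdropT, hfc]
      by_cases hbr : '[' ∈ b
      · rw [if_pos hbr, if_pos hbr, if_neg (by omega)]
      · simp [hbr]
    by_cases hbr : '[' ∈ b
    · rw [if_pos hbr] at hff
      simp only [remove_id_alt, hfind, hff]
      rw [if_pos (show ((a.length : Int) ≠ -1) by omega)]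
      rw [if_pos (show ((a.length : Int) + (1 + ((b.takeWhile (· ≠ '[')).length : Int)) ≠ -1) by omega)]
      have hsl : PySem.Chars.slice temp.toList none
          (some ((a.length : Int) + (1 + ((b.takeWhile (· ≠ '[')).length : Int))))
          = a ++ ' ' :: b.takeWhile (· ≠ '[') := by
        rw [PySem.Chars.slice_eq_listSlice, PySem.List.slice_to _ (by omega)]
        have hN : ((a.length : Int) + (1 + ((b.takeWhile (· ≠ '[')).length : Int))).toNat
            = a.length + (1 + (b.takeWhile (· ≠ '[')).length) := by omega
        rw [hN, hsplit, List.take_append]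
        rw [List.take_of_length_le (by omega)]
        congr 1
        rw [show a.length + (1 + (b.takeWhile (· ≠ '[')).length) - a.length
            = (b.takeWhile (· ≠ '[')).length + 1 from by omega]
        rw [List.take_succ_cons]
        rw [← List.prefix_iff_eq_take.mp (List.takeWhile_prefix _)]
      rw [hsl, replace_single, hcut]
      simp only [List.filter_append, List.filter_cons]
      rw [filter_self ' ' a ha]
      simp
    · rw [if_neg hbr] at hff
      simp only [remove_id_alt, hfind, hff]
      rw [if_pos (show ((a.length : Int) ≠ -1) by omega)]
      rw [if_neg (show ¬ ((-1 : Int) ≠ -1) by simp)]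
      rw [replace_single, hcut, hsplit]
      simp only [List.filter_append, List.filter_cons]
      rw [filter_self ' ' a ha, takeWhile_filter_self '[' b hbr]
      simp
  · have hfind : PySem.Chars.find temp.toList [' '] = -1 := by
      rw [find_single, if_neg hmem]
    simp only [remove_id_alt, hfind]
    simp only [ne_eq, not_true_eq_false, if_false]
    rw [replace_single, filter_self _ _ hmem, cutFilter_no_space _ hmem]
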